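-- pv_equiv track=rewrite | github.com/guilherme-puida/aoc | aoc/solutions/y2023d13.py | solve
-- ===== SOURCE A (Python) =====
-- def solve(pattern, diff):
--     lines = pattern.splitlines()
--     transposed = list(map(list, zip(*lines)))
--
--     def reflection(pat):
--         for i in range(1, len(pat)):
--             above, below = pat[:i], pat[i:]
--             matches = list(zip(reversed(above), below))
--
--             diffs = 0
--
--             for x, y in matches:
--                 diffs += sum(a != b for a, b in zip(x, y))
--
--             if diffs == diff:
--                 return i
--
--         return 0
--
--     return reflection(transposed) + 100 * reflection(lines)
-- ===== SOURCE B (Python) =====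
-- def solve(pattern, diff):
--     lines = pattern.splitlines()
--     w = min(map(len, lines), default=0)
--     cols = [[line[j] for line in lines] for j in range(w)]
--
--     def axis(rows):
--         n = len(rows)
--         totals = [0] * n
--         for a in range(n):
--             for b in range(a + 1, n, 2):
--                 totals[(a + b + 1) // 2] += sum(p != q for p, q in zip(rows[a], rows[b]))
--         for i in range(1, n):
--             if totals[i] == diff:
--                 return i
--         return 0
--
--     return axis(cols) + 100 * axis(lines)
-- ===== Notes on version B (the rewrite author's own statement) =====
-- stated objective: alternative
-- what changed: B never walks outward from a candidate split: one sweep over all odd-distance index pairs (a,b) accumulates their row/column mismatch counts into a per-split table at index (a+b+1)//2, and the reflection is then read off by scanning that table; A instead transposes, slices and zips the grid afresh for every candidate split.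
import Mathlib
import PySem

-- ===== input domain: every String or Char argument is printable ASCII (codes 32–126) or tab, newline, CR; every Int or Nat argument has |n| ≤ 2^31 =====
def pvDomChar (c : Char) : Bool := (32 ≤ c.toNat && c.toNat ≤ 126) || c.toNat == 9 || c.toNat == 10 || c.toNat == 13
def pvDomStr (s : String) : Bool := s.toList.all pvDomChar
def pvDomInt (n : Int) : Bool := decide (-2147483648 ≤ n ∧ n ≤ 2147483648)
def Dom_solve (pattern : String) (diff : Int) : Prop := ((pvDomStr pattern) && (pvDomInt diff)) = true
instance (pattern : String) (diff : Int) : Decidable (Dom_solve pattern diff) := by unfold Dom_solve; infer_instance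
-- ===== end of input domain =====

-- B replaces A's per-split mirror walk by a staged pass: one sweep over all odd-distance row
-- pairs accumulates mismatch totals into a per-split table, then the table is scanned; objective: alternative.

-- ===== PORT A =====
-- sum(a != b for a, b in zip(x, y))  (a 0/1 generator sum is List.countP, per PYSEM)
def pvMism (x y : List Char) : Int := ((x.zip y).countP (fun ab => ab.1 != ab.2) : Int)

-- list(map(list, zip(*lines))): draw one element from every line until some line is exhausted
def pvZipN (xss : List (List Char)) : List (List Char) :=
  if h : xss = [] ∨ xss.any (fun l => l.isEmpty) then []
  else
    xss.map (fun l => l.headD ' ') :: pvZipN (xss.map List.tail)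
termination_by (xss.map List.length).sum
decreasing_by
  rw [not_or] at h
  obtain ⟨h1, h2⟩ := h
  simp only [List.map_map]
  rw [show List.map List.length xss = List.map (fun x : {x // x ∈ xss} => (x.val).length) xss.attach by simp]
  rw [show List.map (List.length ∘ fun x : {x // x ∈ xss} => (↑x : List Char).tail) xss.attach
        = List.map (fun x : {x // x ∈ xss} => (↑x : List Char).tail.length) xss.attach by
      simp [Function.comp]]
  apply List.sum_lt_sum_of_ne_nil
  · simpa using h1
  · rintro ⟨l, hl⟩ -
    have hne : l ≠ [] := by
      intro he
      rw [List.any_eq_true] at h2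
      exact h2 ⟨l, hl, by simp [he]⟩
    cases l with
    | nil => exact absurd rfl hne
    | cons a r => simp

-- def reflection(pat): first i in range(1, len(pat)) whose mirror-mismatch count equals diff, else 0
def pvRefl (diff : Int) (pat : List (List Char)) : Int :=
  match (PySem.List.pyRange 1 (pat.length : Int) 1).findSome? (fun i =>
    let above := PySem.List.slice pat none (some i)
    let below := PySem.List.slice pat (some i) none
    let ms := above.reverse.zip below
    let diffs := ms.foldl (fun acc xy => acc + pvMism xy.1 xy.2) 0
    if diffs = diff then some i else none) with
  | some i => i
  | none => 0

def solve (pattern : String) (diff : Int) : Int :=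
  let lines := (PySem.Str.splitlines pattern).map String.toList
  let transposed := pvZipN lines
  pvRefl diff transposed + 100 * pvRefl diff lines

-- ===== PORT B =====
-- sum(p != q for p, q in zip(rows[a], rows[b]))
def pvMismB (x y : List Char) : Int := ((x.zip y).countP (fun pq => pq.1 != pq.2) : Int)

-- def axis(rows): fill totals[(a+b+1)//2] over all pairs a < b of odd distance, then scan the table.
-- totals[idx] += v is t.set idx.toNat (t[idx] + v): exact, since 0 ≤ idx < len(totals) for every pair.
def pvAxisB (diff : Int) (rows : List (List Char)) : Int :=
  let n := rows.length
  let totals :=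
    (PySem.List.pyRange 0 (n : Int) 1).foldl (fun t a =>
      (PySem.List.pyRange (a + 1) (n : Int) 2).foldl (fun t b =>
        t.set (PySem.Int.floordiv (a + b + 1) 2).toNat
          (PySem.List.pyGetD t (PySem.Int.floordiv (a + b + 1) 2) 0
            + pvMismB (PySem.List.pyGetD rows a []) (PySem.List.pyGetD rows b []))) t)
      (List.replicate n (0 : Int))
  match (PySem.List.pyRange 1 (n : Int) 1).findSome? (fun i =>
    if PySem.List.pyGetD totals i 0 = diff then some i else none) with
  | some i => i
  | none => 0

def solve_alt (pattern : String) (diff : Int) : Int :=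
  let lines := (PySem.Str.splitlines pattern).map String.toList
  -- w = min(map(len, lines), default=0)
  let w : Int := PySem.List.minD (lines.map (fun l => (l.length : Int))) (fun x => x) 0
  -- cols = [[line[j] for line in lines] for j in range(w)]  (j < w ≤ len(line): in range)
  let cols := (PySem.List.pyRange 0 w 1).map (fun j => lines.map (fun row => PySem.List.pyGetD row j ' '))
  pvAxisB diff cols + 100 * pvAxisB diff lines

-- ===== PRECONDITION & SPEC =====
def Spec_solve (pattern : String) (diff : Int) (out : Int) : Prop := out = solve_alt pattern diff
instance (pattern : String) (diff : Int) (out : Int) : Decidable (Spec_solve pattern diff out) := by unfold Spec_solve; infer_instance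

-- ===== CLAIM (what is proved, stated in full; the proofs are below) =====
def Claim_equal_solve : Prop := ∀ (pattern : String) (diff : Int), Dom_solve pattern diff → Spec_solve pattern diff (solve pattern diff)

-- ===== LEMMAS AND PROOFS =====

theorem findSome?_congr_mem {α β : Type} (l : List α) (f g : α → Option β)
    (h : ∀ a ∈ l, f a = g a) : l.findSome? f = l.findSome? g := by
  induction l with
  | nil => rfl
  | cons x t ih =>
    simp only [List.findSome?_cons, h x (by simp)]
    cases g x with
    | none => exact ih (fun a ha => h a (by simp [ha]))
    | some b => rfl

-- A's zip(reversed(above), below) pairs index (i-1-t) with (i+t), t < min(i, len-i)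
theorem zip_rev_take_drop (pat : List (List Char)) (j : Nat) :
    (pat.take j).reverse.zip (pat.drop j)
      = (List.range (min j (pat.length - j))).map
          (fun t => (pat.getD (j - 1 - t) [], pat.getD (j + t) [])) := by
  apply List.ext_getElem
  · simp [Nat.min_def]; split_ifs <;> omega
  · intro t h1 h2
    simp only [List.getElem_zip, List.getElem_reverse, List.getElem_take, List.getElem_drop,
      List.getElem_map, List.getElem_range] at *
    have hlen : t < min j (pat.length - j) := by simpa using h2
    obtain ⟨ht1, ht2⟩ := lt_min_iff.mp hlen
    have hj : j < pat.length := by omega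
    have e1 : (pat.take j).length = j := by simp; omega
    rw [Prod.mk.injEq]
    constructor
    · rw [List.getD_eq_getElem _ _ (by omega)]
      congr 1
      omega
    · rw [List.getD_eq_getElem _ _ (by omega)]

-- nested index loop = one fold over the flattened pair list
theorem foldl_foldl_flatMap {α β T : Type} (l : List α) (g : α → List β)
    (step : T → α → β → T) (init : T) :
    l.foldl (fun t a => (g a).foldl (fun t b => step t a b) t) init
      = (l.flatMap (fun a => (g a).map (fun b => (a, b)))).foldl
          (fun t p => step t p.1 p.2) init := by
  induction l generalizing init with
  | nil => rfl
  | cons a l ih =>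
    simp only [List.foldl_cons, List.flatMap_cons, List.foldl_append, List.foldl_map]
    exact ih _

-- each table entry accumulates exactly the values of the pairs routed to it
theorem bump_getD {P : Type} (L : List P) (f : P → Nat) (v : P → Int) (t : List Int)
    (hf : ∀ p ∈ L, f p < t.length) (j : Nat) :
    (L.foldl (fun t p => t.set (f p) (t.getD (f p) 0 + v p)) t).getD j 0
      = t.getD j 0 + ((L.filter (fun p => f p == j)).map v).sum := by
  induction L generalizing t with
  | nil => simp
  | cons p L ih =>
    simp only [List.foldl_cons, List.filter_cons]
    have hp : f p < t.length := hf p (by simp)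
    rw [ih _ (fun q hq => by rw [List.length_set]; exact hf q (by simp [hq]))]
    by_cases hj : f p = j
    · subst hj
      simp only [beq_self_eq_true, if_true, List.map_cons, List.sum_cons]
      rw [List.getD_eq_getElem _ _ (by simpa using hp), List.getElem_set_self]
      rw [List.getD_eq_getElem _ _ hp]
      ring
    · simp only [beq_iff_eq, hj, if_false]
      congr 1
      by_cases hjlen : j < t.length
      · rw [List.getD_eq_getElem _ _ (by simpa using hjlen), List.getD_eq_getElem _ _ hjlen]
        rw [List.getElem_set_ne hj]
      · rw [List.getD_eq_default _ _ (by simpa using not_lt.mp hjlen),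
          List.getD_eq_default _ _ (not_lt.mp hjlen)]

-- filter of range(m) by equality with K
theorem range_filter_eq (m K : Nat) :
    (List.range m).filter (fun k => k == K) = if K < m then [K] else [] := by
  induction m with
  | zero => simp
  | succ m ih =>
    rw [List.range_succ, List.filter_append, ih]
    by_cases h : K < m
    · rw [if_pos h, if_pos (by omega)]
      simp only [List.filter_cons, List.filter_nil]
      have : ¬ (m == K) = true := by simp; omega
      simp [this]
    · rw [if_neg h]
      by_cases h2 : K = m
      · subst h2
        simp
      · rw [if_neg (by omega)]
        have : ¬ (m == K) = true := by simp; omega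
        simp [this]

-- the filtered inner range contains at most the mirror partner 2i-1-a
theorem inner_filter_eq (n a i : Int) (ha : 0 ≤ a) :
    (PySem.List.pyRange (a + 1) n 2).filter
        (fun b => (PySem.Int.floordiv (a + b + 1) 2).toNat == i.toNat)
      = if a < i ∧ 2 * i - 1 - a < n ∧ 1 ≤ i then [2 * i - 1 - a] else [] := by
  rw [PySem.List.pyRange_of_pos _ _ (by norm_num), List.filter_map]
  have hfd : ∀ k : Nat, PySem.Int.floordiv (a + (a + 1 + 2 * (k : Int)) + 1) 2 = a + 1 + (k : Int) := by
    intro k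
    rw [PySem.Int.floordiv_eq_ediv_of_pos (by norm_num)]
    omega
  by_cases hC : a < i ∧ 2 * i - 1 - a < n ∧ 1 ≤ i
  · rw [if_pos hC]
    have hcg : ∀ k ∈ List.range (if a + 1 < n then ((n - (a + 1) + 2 - 1) / 2).toNat else 0),
        ((fun b => (PySem.Int.floordiv (a + b + 1) 2).toNat == i.toNat) ∘
          (fun k : Nat => a + 1 + 2 * (k : Int))) k = (k == (i - a - 1).toNat) := by
      intro k _
      simp only [Function.comp, hfd]
      rw [Bool.eq_iff_iff]
      simp only [beq_iff_eq]
      omega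
    rw [List.filter_congr hcg, range_filter_eq, if_pos (by rw [if_pos (by omega)]; omega)]
    simp only [List.map_cons, List.map_nil]
    congr 1
    omega
  · rw [if_neg hC]
    rw [List.filter_eq_nil_iff.mpr, List.map_nil]
    intro k hk
    simp only [Function.comp, hfd, beq_iff_eq]
    intro hEq
    rw [List.mem_range] at hk
    by_cases hn : a + 1 < n
    · rw [if_pos hn] at hk
      omega
    · rw [if_neg hn] at hk
      omega

-- after the sweep, table entry i holds exactly A's mirror mismatch sum for split i
theorem totals_getD (pat : List (List Char)) (i : Int) (h1 : 1 ≤ i) (h2 : i < (pat.length : Int)) :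
    PySem.List.pyGetD
      ((PySem.List.pyRange 0 (pat.length : Int) 1).foldl (fun t a =>
        (PySem.List.pyRange (a + 1) (pat.length : Int) 2).foldl (fun t b =>
          t.set (PySem.Int.floordiv (a + b + 1) 2).toNat
            (PySem.List.pyGetD t (PySem.Int.floordiv (a + b + 1) 2) 0
              + pvMismB (PySem.List.pyGetD pat a []) (PySem.List.pyGetD pat b []))) t)
        (List.replicate pat.length (0 : Int))) i 0
    = ((List.range (min i.toNat (pat.length - i.toNat))).map
        (fun t => pvMism (pat.getD (i.toNat - 1 - t) []) (pat.getD (i.toNat + t) []))).sum := by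
  have hN : (0 : Int) ≤ (pat.length : Int) := by positivity
  rw [show (PySem.List.pyRange 0 (pat.length : Int) 1).foldl (fun t a =>
        (PySem.List.pyRange (a + 1) (pat.length : Int) 2).foldl (fun t b =>
          t.set (PySem.Int.floordiv (a + b + 1) 2).toNat
            (PySem.List.pyGetD t (PySem.Int.floordiv (a + b + 1) 2) 0
              + pvMismB (PySem.List.pyGetD pat a []) (PySem.List.pyGetD pat b []))) t)
        (List.replicate pat.length (0 : Int))
      = ((PySem.List.pyRange 0 (pat.length : Int) 1).flatMap
          (fun a => (PySem.List.pyRange (a + 1) (pat.length : Int) 2).map (fun b => (a, b)))).foldl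
          (fun t p =>
            t.set (PySem.Int.floordiv (p.1 + p.2 + 1) 2).toNat
              (PySem.List.pyGetD t (PySem.Int.floordiv (p.1 + p.2 + 1) 2) 0
                + pvMismB (PySem.List.pyGetD pat p.1 []) (PySem.List.pyGetD pat p.2 [])))
          (List.replicate pat.length (0 : Int))
      from foldl_foldl_flatMap _ _
        (fun (t : List Int) (a b : Int) =>
          t.set (PySem.Int.floordiv (a + b + 1) 2).toNat
            (PySem.List.pyGetD t (PySem.Int.floordiv (a + b + 1) 2) 0
              + pvMismB (PySem.List.pyGetD pat a []) (PySem.List.pyGetD pat b []))) _]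
  set L := (PySem.List.pyRange 0 (pat.length : Int) 1).flatMap
    (fun a => (PySem.List.pyRange (a + 1) (pat.length : Int) 2).map (fun b => (a, b))) with hL
  set v : Int × Int → Int :=
    fun p => pvMismB (PySem.List.pyGetD pat p.1 []) (PySem.List.pyGetD pat p.2 []) with hv
  have hmem : ∀ p ∈ L, 0 ≤ p.1 ∧ p.1 + 1 ≤ p.2 ∧ p.2 < (pat.length : Int) := by
    intro p hp
    rw [hL, List.mem_flatMap] at hp
    obtain ⟨a, ha, hp⟩ := hp
    rw [List.mem_map] at hp
    obtain ⟨b, hb, rfl⟩ := hp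
    rw [PySem.List.mem_pyRange_one] at ha
    rw [PySem.List.mem_pyRange_iff_of_pos (by norm_num)] at hb
    exact ⟨ha.1, hb.1, hb.2.1⟩
  have hfd : ∀ p : Int × Int, 0 ≤ p.1 → p.1 + 1 ≤ p.2 →
      PySem.Int.floordiv (p.1 + p.2 + 1) 2 = (p.1 + p.2 + 1) / 2 :=
    fun p _ _ => PySem.Int.floordiv_eq_ediv_of_pos (by norm_num)
  rw [PySem.List.foldl_congr_mem L _
    (fun t p => t.set (PySem.Int.floordiv (p.1 + p.2 + 1) 2).toNat
      (t.getD (PySem.Int.floordiv (p.1 + p.2 + 1) 2).toNat 0 + v p))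
    (List.replicate pat.length (0 : Int))
    (by
      intro t p hp
      obtain ⟨hp1, hp2, hp3⟩ := hmem p hp
      rw [PySem.List.pyGetD_of_nonneg]
      rw [hfd p hp1 hp2]
      omega)]
  rw [PySem.List.pyGetD_of_nonneg _ _ (by omega)]
  rw [bump_getD L _ v _
    (by
      intro p hp
      obtain ⟨hp1, hp2, hp3⟩ := hmem p hp
      rw [List.length_replicate, hfd p hp1 hp2]
      omega)]
  rw [List.getD_replicate (h := by omega), zero_add]
  -- route the filtered pair list through the mirror partners
  rw [hL, List.filter_flatMap]
  have hinner : ∀ a ∈ PySem.List.pyRange 0 (pat.length : Int) 1,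
      ((PySem.List.pyRange (a + 1) (pat.length : Int) 2).map (fun b => (a, b))).filter
          (fun p => (PySem.Int.floordiv (p.1 + p.2 + 1) 2).toNat == i.toNat)
        = if a < i ∧ 2 * i - 1 - a < (pat.length : Int) ∧ 1 ≤ i
          then [(a, 2 * i - 1 - a)] else [] := by
    intro a ha
    rw [PySem.List.mem_pyRange_one] at ha
    rw [List.filter_map]
    rw [show List.filter
          ((fun p : Int × Int => (PySem.Int.floordiv (p.1 + p.2 + 1) 2).toNat == i.toNat)
            ∘ (fun b => (a, b)))
          (PySem.List.pyRange (a + 1) (pat.length : Int) 2)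
        = List.filter (fun b => (PySem.Int.floordiv (a + b + 1) 2).toNat == i.toNat)
          (PySem.List.pyRange (a + 1) (pat.length : Int) 2)
      from List.filter_congr (fun b _ => rfl)]
    rw [inner_filter_eq _ _ _ ha.1]
    by_cases hC : a < i ∧ 2 * i - 1 - a < (pat.length : Int) ∧ 1 ≤ i
    · rw [if_pos hC, if_pos hC]; rfl
    · rw [if_neg hC, if_neg hC]; rfl
  rw [List.flatMap_congr hinner, List.map_flatMap, List.flatMap, List.sum_flatten, List.map_map]
  have hifsum : ∀ a ∈ PySem.List.pyRange 0 (pat.length : Int) 1,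
      (List.sum ∘ (fun a => List.map v
          (if a < i ∧ 2 * i - 1 - a < (pat.length : Int) ∧ 1 ≤ i
           then [(a, 2 * i - 1 - a)] else []))) a
        = if a < i ∧ 2 * i - 1 - a < (pat.length : Int) then v (a, 2 * i - 1 - a) else 0 := by
    intro a _
    simp only [Function.comp]
    by_cases hC : a < i ∧ 2 * i - 1 - a < (pat.length : Int)
    · rw [if_pos ⟨hC.1, hC.2, h1⟩, if_pos hC]; simp
    · rw [if_neg (by tauto), if_neg hC]; rfl
  rw [List.map_congr_left hifsum]
  -- split range(n) at lo = max 0 (2i-n) and at i; only [lo, i) contributes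
  have hsplit : PySem.List.pyRange 0 (pat.length : Int) 1
      = (PySem.List.pyRange 0 (max 0 (2 * i - (pat.length : Int))) 1
          ++ PySem.List.pyRange (max 0 (2 * i - (pat.length : Int))) i 1)
        ++ PySem.List.pyRange i (pat.length : Int) 1 := by
    rw [← PySem.List.pyRange_one_append 0 (max 0 (2 * i - (pat.length : Int))) i (by omega) (by omega)]
    rw [← PySem.List.pyRange_one_append 0 i (pat.length : Int) (by omega) (by omega)]
  rw [hsplit, List.map_append, List.map_append, List.sum_append, List.sum_append]
  rw [List.sum_eq_zero (l := List.map _ (PySem.List.pyRange 0 (max 0 (2 * i - (pat.length : Int))) 1)) ?_,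
    List.sum_eq_zero (l := List.map _ (PySem.List.pyRange i (pat.length : Int) 1)) ?_]
  · rw [zero_add, add_zero]
    have hmid : ∀ a ∈ PySem.List.pyRange (max 0 (2 * i - (pat.length : Int))) i 1,
        (if a < i ∧ 2 * i - 1 - a < (pat.length : Int) then v (a, 2 * i - 1 - a) else 0)
          = v (a, 2 * i - 1 - a) := by
      intro a ha
      rw [PySem.List.mem_pyRange_one] at ha
      rw [if_pos (by omega)]
    rw [List.map_congr_left hmid, ← List.sum_reverse, ← List.map_reverse]
    have hrev : (PySem.List.pyRange (max 0 (2 * i - (pat.length : Int))) i 1).reverse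
        = (List.range (min i.toNat (pat.length - i.toNat))).map (fun (k : Nat) => i - 1 - (k : Int)) := by
      rw [show PySem.List.pyRange (max 0 (2 * i - (pat.length : Int))) i 1
            = PySem.List.pyRange ((max 0 (2 * i - (pat.length : Int)) - 1) + 1) ((i - 1) + 1) 1 by
          norm_num]
      rw [← PySem.List.pyRange_neg_one_eq_reverse (i - 1) (max 0 (2 * i - (pat.length : Int)) - 1)]
      rw [PySem.List.pyRange_neg_one]
      rw [show (i - 1 - (max 0 (2 * i - (pat.length : Int)) - 1)).toNat
            = min i.toNat (pat.length - i.toNat) by omega]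
    rw [hrev, List.map_map]
    apply congrArg
    apply List.map_congr_left
    intro k hk
    rw [List.mem_range] at hk
    simp only [Function.comp, hv, pvMismB, pvMism]
    rw [PySem.List.pyGetD_of_nonneg _ _ (by omega), PySem.List.pyGetD_of_nonneg _ _ (by omega)]
    rw [show (i - 1 - (k : Int)).toNat = i.toNat - 1 - k by omega,
      show (2 * i - 1 - (i - 1 - (k : Int))).toNat = i.toNat + k by omega]
  · intro x hx
    rw [List.mem_map] at hx
    obtain ⟨a, ha, rfl⟩ := hx
    rw [PySem.List.mem_pyRange_one] at ha
    rw [if_neg (by omega)]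
  · intro x hx
    rw [List.mem_map] at hx
    obtain ⟨a, ha, rfl⟩ := hx
    rw [PySem.List.mem_pyRange_one] at ha
    rw [if_neg (by omega)]

-- B's table scan produces A's mirror mismatch sum at every admissible split
theorem axisB_eq_refl (diff : Int) (pat : List (List Char)) :
    pvAxisB diff pat = pvRefl diff pat := by
  simp only [pvAxisB, pvRefl]
  congr 1
  apply findSome?_congr_mem
  intro i hi
  rw [PySem.List.mem_pyRange_one] at hi
  obtain ⟨hi1, hi2⟩ := hi
  rw [totals_getD pat i hi1 hi2]
  rw [PySem.List.slice_to pat (by omega), PySem.List.slice_from pat (by omega)]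
  rw [zip_rev_take_drop pat i.toNat, PySem.List.foldl_add, List.map_map, zero_add]
  rfl

-- ==== the transpose: B's cols list equals A's zip(*lines) (machinery from the A side) ====

-- the number of columns zip(*lines) produces: min of the line lengths (0 for no lines)
def pvMlen : List (List Char) → Nat
  | [] => 0
  | x :: t => t.foldl (fun m l => min m l.length) x.length

theorem foldl_min_le_init (t : List (List Char)) (a : Nat) :
    t.foldl (fun m l => min m l.length) a ≤ a := by
  induction t generalizing a with
  | nil => simp
  | cons l t ih => exact le_trans (ih _) (min_le_left _ _)

theorem foldl_min_le_mem (t : List (List Char)) (a : Nat) (l : List Char) (hl : l ∈ t) :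
    t.foldl (fun m l => min m l.length) a ≤ l.length := by
  induction t generalizing a with
  | nil => simp at hl
  | cons x t ih =>
    rcases List.mem_cons.mp hl with h | h
    · subst h
      simp only [List.foldl_cons]
      exact le_trans (foldl_min_le_init _ _) (min_le_right _ _)
    · exact ih _ h

theorem pvMlen_eq_zero_of_empty (xss : List (List Char)) (l : List Char)
    (hl : l ∈ xss) (he : l = []) : pvMlen xss = 0 := by
  cases xss with
  | nil => rfl
  | cons x t =>
    rcases List.mem_cons.mp hl with h | h
    · have hx : x.length = 0 := by rw [← h, he]; rfl
      have h1 := foldl_min_le_init t x.length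
      simp only [pvMlen]
      omega
    · have h1 := foldl_min_le_mem t x.length l h
      have h2 : l.length = 0 := by rw [he]; rfl
      simp only [pvMlen]
      omega

theorem foldl_min_tail (t : List (List Char)) (a : Nat)
    (hne : ∀ l ∈ t, l ≠ []) (ha : 1 ≤ a) :
    (t.map List.tail).foldl (fun m l => min m l.length) (a - 1)
      = t.foldl (fun m l => min m l.length) a - 1
    ∧ 1 ≤ t.foldl (fun m l => min m l.length) a := by
  induction t generalizing a with
  | nil => simpa using ha
  | cons l t ih =>
    have hl : l ≠ [] := hne l (by simp)
    have hlen : 1 ≤ l.length := by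
      cases l with | nil => exact absurd rfl hl | cons c r => simp
    have e : min (a - 1) l.tail.length = min a l.length - 1 := by
      have : l.tail.length = l.length - 1 := by cases l with | nil => rfl | cons c r => simp
      omega
    simp only [List.map_cons, List.foldl_cons, e]
    exact ih (min a l.length) (fun x hx => hne x (by simp [hx])) (by omega)

theorem sum_len_tail_lt (xss : List (List Char)) (h1 : xss ≠ []) (h2 : ∀ l ∈ xss, l ≠ []) :
    ((xss.map List.tail).map List.length).sum < (xss.map List.length).sum := by
  rw [List.map_map]
  apply List.sum_lt_sum_of_ne_nil h1
  intro l hl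
  have := h2 l hl
  cases l with
  | nil => exact absurd rfl this
  | cons c r => simp [Function.comp]

theorem mlen_nil_or_empty (xss : List (List Char))
    (h : xss = [] ∨ xss.any (fun l => l.isEmpty)) : pvMlen xss = 0 := by
  rcases h with h | h
  · subst h; rfl
  · rw [List.any_eq_true] at h
    obtain ⟨l, hl, he⟩ := h
    exact pvMlen_eq_zero_of_empty xss l hl (by simpa using he)

theorem pvZipN_eq_aux (N : Nat) : ∀ xss : List (List Char), (xss.map List.length).sum ≤ N →
    pvZipN xss = (List.range (pvMlen xss)).map (fun c => xss.map (fun l => l.getD c ' ')) := by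
  induction N with
  | zero =>
    intro xss h
    have hc : xss = [] ∨ xss.any (fun l => l.isEmpty) := by
      by_contra hc
      rw [not_or] at hc
      obtain ⟨hc1, hc2⟩ := hc
      have hne : ∀ l ∈ xss, l ≠ [] := by
        intro l hl he
        rw [List.any_eq_true] at hc2
        exact hc2 ⟨l, hl, by simp [he]⟩
      obtain ⟨x, t, rfl⟩ : ∃ x t, xss = x :: t := by
        cases xss with
        | nil => exact absurd rfl hc1
        | cons x t => exact ⟨x, t, rfl⟩
      have : 1 ≤ x.length := by
        have := hne x (by simp)
        cases x with | nil => exact absurd rfl this | cons c r => simp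
      simp only [List.map_cons, List.sum_cons] at h
      omega
    rw [pvZipN, dif_pos hc, mlen_nil_or_empty xss hc]
    rfl
  | succ N ih =>
    intro xss h
    rw [pvZipN]
    by_cases hc : xss = [] ∨ xss.any (fun l => l.isEmpty)
    · rw [dif_pos hc, mlen_nil_or_empty xss hc]
      rfl
    · rw [dif_neg hc]
      rw [not_or] at hc
      obtain ⟨h1, h2⟩ := hc
      have hne : ∀ l ∈ xss, l ≠ [] := by
        intro l hl he
        rw [List.any_eq_true] at h2
        exact h2 ⟨l, hl, by simp [he]⟩
      have hdec := sum_len_tail_lt xss h1 hne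
      have hmt : pvMlen (xss.map List.tail) = pvMlen xss - 1 ∧ 1 ≤ pvMlen xss := by
        obtain ⟨x, t, rfl⟩ : ∃ x t, xss = x :: t := by
          cases xss with
          | nil => exact absurd rfl h1
          | cons x t => exact ⟨x, t, rfl⟩
        have hx1 : 1 ≤ x.length := by
          have := hne x (by simp)
          cases x with | nil => exact absurd rfl this | cons c r => simp
        obtain ⟨hfold, hge⟩ :=
          foldl_min_tail t x.length (fun l hl => hne l (by simp [hl])) hx1
        refine ⟨?_, hge⟩
        simp only [pvMlen, List.map_cons]
        have hxt : x.tail.length = x.length - 1 := by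
          cases x with | nil => rfl | cons c r => simp
        rw [hxt]
        exact hfold
      obtain ⟨hmt1, hmt2⟩ := hmt
      have hsucc : pvMlen xss = pvMlen (xss.map List.tail) + 1 := by omega
      rw [ih (xss.map List.tail) (by omega), hsucc, List.range_succ_eq_map,
        List.map_cons, List.map_map]
      have ehead : xss.map (fun l => l.headD ' ')
          = xss.map (fun l => l.getD 0 ' ') := by
        apply List.map_congr_left
        intro l _
        cases l <;> rfl
      have etail :
          (List.range (pvMlen (xss.map List.tail))).map
              (fun c => (xss.map List.tail).map (fun l => l.getD c ' '))
            = (List.range (pvMlen (xss.map List.tail))).map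
              ((fun c => xss.map (fun l => l.getD c ' ')) ∘ Nat.succ) := by
        apply List.map_congr_left
        intro c _
        simp only [Function.comp, List.map_map]
        apply List.map_congr_left
        intro l hl
        have := hne l hl
        cases l with
        | nil => exact absurd rfl this
        | cons a r => rfl
      rw [ehead, etail]

theorem pvZipN_eq (xss : List (List Char)) :
    pvZipN xss = (List.range (pvMlen xss)).map (fun c => xss.map (fun l => l.getD c ' ')) :=
  pvZipN_eq_aux (xss.map List.length).sum xss le_rfl

theorem foldl_min_int_cast (t : List (List Char)) (a : Nat) :
    t.foldl (fun m l => min m (l.length : Int)) (a : Int)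
      = ((t.foldl (fun m l => min m l.length) a : Nat) : Int) := by
  induction t generalizing a with
  | nil => rfl
  | cons l t ih =>
    simp only [List.foldl_cons]
    rw [show min (a : Int) (l.length : Int) = ((min a l.length : Nat) : Int) by
      rw [Nat.cast_min], ih]

-- B's w = min(map(len, lines), default=0) is the column count of A's transpose
theorem w_eq (lines : List (List Char)) :
    PySem.List.minD (lines.map (fun l => (l.length : Int))) (fun x => x) 0
      = ((pvMlen lines : Nat) : Int) := by
  cases lines with
  | nil => rfl
  | cons x t =>
    unfold PySem.List.minD
    rw [List.map_cons, PySem.List.min?_id_cons]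
    simp only [Option.getD_some]
    rw [List.foldl_map, foldl_min_int_cast]
    rfl

-- B's cols list is exactly A's transposed grid
theorem cols_eq (lines : List (List Char)) :
    (PySem.List.pyRange 0 (PySem.List.minD (lines.map (fun l => (l.length : Int))) (fun x => x) 0) 1).map
        (fun j => lines.map (fun row => PySem.List.pyGetD row j ' '))
      = pvZipN lines := by
  rw [w_eq, pvZipN_eq, PySem.List.pyRange_zero_natCast, List.map_map]
  apply List.map_congr_left
  intro c _
  simp only [Function.comp]
  apply List.map_congr_left
  intro l _
  rw [PySem.List.pyGetD_natCast]

-- ===== VERDICT (by name: the statement is the Claim_ definition above) =====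
theorem solve_spec : Claim_equal_solve := by
  intro pattern diff _
  show solve pattern diff = solve_alt pattern diff
  simp only [solve, solve_alt]
  rw [cols_eq, axisB_eq_refl, axisB_eq_refl]
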